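-- pv_equiv track=rewrite | github.com/huytq000605/CF-CP | Codeforces Round #825 (Div. 2)/C.py | solve
-- ===== SOURCE A (Python) =====
-- def solve(a, n):
--     start = 0
--     result = 0
--     for i, num in enumerate(a):
--         while num <= (i - start):
--             start += 1
--         result += (i - start + 1)
--     return result
-- ===== SOURCE B (Python) =====
-- def solve(a, n):
--     ln = len(a)
--     # Pass 1: collect the strict prefix-maximum "records" of max(0, i - a[i] + 1).
--     records = []
--     best = 0
--     for i, x in enumerate(a):
--         v = i - x + 1
--         if v > best:
--             best = v
--             records.append((i, v))
--     # Pass 2 (right to left): sum of the running maxima = sum of each record value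
--     # times the length of the interval it dominates.
--     s = 0
--     prev = ln
--     for k, v in reversed(records):
--         s += v * (prev - k)
--         prev = k
--     # Answer = total of all (i+1) minus the sum of running maxima.
--     return ln * (ln + 1) // 2 - s
-- ===== Notes on version B (the rewrite author's own statement) =====
-- stated objective: alternative
-- what changed: A counts the window length per index while advancing the left bound with a nested while; B instead collects the strict prefix-maximum records of i - a[i] + 1 in one pass and then subtracts each record value times the interval it dominates from the closed form n(n+1)/2.
import Mathlib
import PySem

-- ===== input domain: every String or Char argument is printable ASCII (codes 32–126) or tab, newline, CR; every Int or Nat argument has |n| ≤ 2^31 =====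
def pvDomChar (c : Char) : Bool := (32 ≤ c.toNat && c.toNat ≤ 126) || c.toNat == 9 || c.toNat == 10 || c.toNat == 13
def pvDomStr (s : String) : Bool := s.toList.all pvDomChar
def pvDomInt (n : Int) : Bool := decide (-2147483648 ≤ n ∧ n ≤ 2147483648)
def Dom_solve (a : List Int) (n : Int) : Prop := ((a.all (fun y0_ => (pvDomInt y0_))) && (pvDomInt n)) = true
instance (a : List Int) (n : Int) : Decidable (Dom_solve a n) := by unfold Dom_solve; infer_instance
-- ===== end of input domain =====

-- B replaces A's per-element sliding-window accumulation by a two-phase contribution scheme: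
-- collect the strict prefix-maximum records of i - a[i] + 1, then subtract each record value
-- times the interval it dominates from the closed form n(n+1)/2; objective: alternative.

-- ===== PORT A =====
-- the `while num <= (i - start): start += 1` loop of A
def solveWhile (num i start : Int) : Int :=
  if num ≤ i - start then solveWhile num i (start + 1) else start
termination_by (i - num - start + 1).toNat
decreasing_by omega

def solve (a : List Int) (_n : Int) : Int :=
  ((PySem.List.enumerate a 0).foldl
    (fun (s : Int × Int) (p : Int × Int) =>
      let start := solveWhile p.2 p.1 s.1
      (start, s.2 + (p.1 - start + 1)))
    (0, 0)).2

-- ===== PORT B =====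
def solve_alt (a : List Int) (_n : Int) : Int :=
  let ln : Int := a.length
  -- pass 1: records = strict prefix maxima (index, value) of i - x + 1 above 0
  let pass1 := (PySem.List.enumerate a 0).foldl
    (fun (st : Int × List (Int × Int)) (p : Int × Int) =>
      let v := p.1 - p.2 + 1
      if st.1 < v then (v, st.2 ++ [(p.1, v)]) else st)
    (0, ([] : List (Int × Int)))
  -- pass 2: right-to-left over records, state (s, prev)
  let pass2 := pass1.2.reverse.foldl
    (fun (st : Int × Int) (r : Int × Int) => (st.1 + r.2 * (st.2 - r.1), r.1))
    (0, ln)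
  PySem.Int.floordiv (ln * (ln + 1)) 2 - pass2.1

-- ===== PRECONDITION & SPEC =====
def Spec_solve (a : List Int) (n : Int) (out : Int) : Prop := out = solve_alt a n
instance (a : List Int) (n : Int) (out : Int) : Decidable (Spec_solve a n out) := by unfold Spec_solve; infer_instance

-- ===== CLAIM (what is proved, stated in full; the proofs are below) =====
def Claim_equal_solve : Prop := ∀ (a : List Int) (n : Int), Dom_solve a n → Spec_solve a n (solve a n)

-- ===== LEMMAS AND PROOFS =====
theorem solveWhile_eq (num i start : Int) : solveWhile num i start = max start (i - num + 1) := by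
  fun_induction solveWhile num i start with
  | case1 s h ih => rw [ih]; omega
  | case2 s h => omega

-- reference recursions used to relate the two folds
def pvRsum : List Int → Int → Int → Int
  | [], _, _ => 0
  | x :: xs, i, best => (i + 1 - max best (i - x + 1)) + pvRsum xs (i + 1) (max best (i - x + 1))

def pvSsum : List Int → Int → Int → Int
  | [], _, _ => 0
  | x :: xs, i, best => max best (i - x + 1) + pvSsum xs (i + 1) (max best (i - x + 1))

def pvTsum : List Int → Int → Int
  | [], _ => 0
  | _ :: xs, i => (i + 1) + pvTsum xs (i + 1)

def pvRecs : List Int → Int → Int → List (Int × Int)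
  | [], _, _ => []
  | x :: xs, i, best =>
    if best < i - x + 1 then (i, i - x + 1) :: pvRecs xs (i + 1) (i - x + 1)
    else pvRecs xs (i + 1) best

def pvFirstIdx : List (Int × Int) → Int → Int
  | [], e => e
  | (k, _) :: _, _ => k

def pvSumTail : List (Int × Int) → Int → Int
  | [], _ => 0
  | (k, v) :: rest, e => v * (pvFirstIdx rest e - k) + pvSumTail rest e

theorem pvFirstIdx_cons (k v : Int) (rest : List (Int × Int)) (e : Int) :
    pvFirstIdx ((k, v) :: rest) e = k := rfl

theorem pvSumTail_cons (k v : Int) (rest : List (Int × Int)) (e : Int) :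
    pvSumTail ((k, v) :: rest) e = v * (pvFirstIdx rest e - k) + pvSumTail rest e := rfl

theorem foldA_eq (xs : List Int) : ∀ (i start res : Int),
    ((PySem.List.enumerate xs i).foldl
      (fun (s : Int × Int) (p : Int × Int) =>
        let st := solveWhile p.2 p.1 s.1
        (st, s.2 + (p.1 - st + 1)))
      (start, res)).2 = res + pvRsum xs i start := by
  induction xs with
  | nil => intro i start res; simp [PySem.List.enumerate_nil, pvRsum]
  | cons x t ih =>
      intro i start res
      rw [PySem.List.enumerate_cons]
      simp only [List.foldl_cons]
      rw [ih]
      simp only [solveWhile_eq, pvRsum]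
      ring

theorem foldB1_eq (xs : List Int) : ∀ (i best : Int) (acc : List (Int × Int)),
    ((PySem.List.enumerate xs i).foldl
      (fun (st : Int × List (Int × Int)) (p : Int × Int) =>
        let v := p.1 - p.2 + 1
        if st.1 < v then (v, st.2 ++ [(p.1, v)]) else st)
      (best, acc)).2 = acc ++ pvRecs xs i best := by
  induction xs with
  | nil => intro i best acc; simp [PySem.List.enumerate_nil, pvRecs]
  | cons x t ih =>
      intro i best acc
      rw [PySem.List.enumerate_cons]
      simp only [List.foldl_cons, pvRecs]
      by_cases h : best < i - x + 1
      · simp only [if_pos h, ih]; simp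
      · simp only [if_neg h, ih]

theorem foldB2_eq (recs : List (Int × Int)) (e s0 : Int) :
    recs.reverse.foldl
      (fun (st : Int × Int) (r : Int × Int) => (st.1 + r.2 * (st.2 - r.1), r.1))
      (s0, e) = (s0 + pvSumTail recs e, pvFirstIdx recs e) := by
  rw [List.foldl_reverse]
  induction recs with
  | nil => simp [pvSumTail, pvFirstIdx]
  | cons r t ih =>
      obtain ⟨k, v⟩ := r
      simp only [List.foldr_cons, ih, pvSumTail_cons, pvFirstIdx_cons, Prod.mk.injEq]
      exact ⟨by ring, trivial⟩

theorem pvSsum_eq (xs : List Int) : ∀ (i best : Int),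
    pvSsum xs i best =
      best * (pvFirstIdx (pvRecs xs i best) (i + xs.length) - i)
        + pvSumTail (pvRecs xs i best) (i + xs.length) := by
  induction xs with
  | nil => intro i best; simp [pvSsum, pvRecs, pvFirstIdx, pvSumTail]
  | cons x t ih =>
      intro i best
      simp only [pvSsum, pvRecs, List.length_cons]
      have he : i + ((t.length + 1 : Nat) : Int) = (i + 1) + (t.length : Int) := by
        push_cast; ring
      rw [he]
      by_cases h : best < i - x + 1
      · rw [if_pos h, max_eq_right (by omega), pvFirstIdx_cons, pvSumTail_cons,
          ih (i + 1) (i - x + 1)]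
        ring
      · rw [if_neg h, max_eq_left (by omega), ih (i + 1) best]
        ring

theorem pvRsum_eq (xs : List Int) : ∀ (i best : Int),
    pvRsum xs i best = pvTsum xs i - pvSsum xs i best := by
  induction xs with
  | nil => intro i best; simp [pvRsum, pvTsum, pvSsum]
  | cons x t ih => intro i best; simp only [pvRsum, pvTsum, pvSsum, ih]; ring

theorem pvTsum_closed (xs : List Int) : ∀ (i : Int),
    2 * pvTsum xs i = xs.length * (2 * i + xs.length + 1) := by
  induction xs with
  | nil => intro i; simp [pvTsum]
  | cons x t ih =>
      intro i
      simp only [pvTsum, List.length_cons]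
      push_cast
      linear_combination ih (i + 1)

-- ===== VERDICT (by name: the statement is the Claim_ definition above) =====
theorem solve_spec : Claim_equal_solve := by
  intro a n _
  unfold Spec_solve solve solve_alt
  simp only [foldA_eq, foldB1_eq, List.nil_append, foldB2_eq, zero_add]
  have hT : ((a.length : Int) * ((a.length : Int) + 1)) = 2 * pvTsum a 0 := by
    have := pvTsum_closed a 0
    linarith
  have hdiv : PySem.Int.floordiv ((a.length : Int) * ((a.length : Int) + 1)) 2 = pvTsum a 0 := by
    rw [hT, PySem.Int.floordiv_eq_ediv_of_pos (by norm_num)]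
    exact Int.mul_ediv_cancel_left _ (by norm_num)
  rw [hdiv, pvRsum_eq, pvSsum_eq]
  simp
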